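-- pv_equiv track=rewrite | github.com/owen1050/CardCouting | Test.py | handsToPoints
-- ===== SOURCE A (Python) =====
-- def handsToPoints(h):
--     ret = {}
--     for i in h:
--         possPts = [0]
--         for j in i:
--             if(j == 1):
--                 for k in range(len(possPts)):
--                     possPts.append(possPts[k] + 11)
--                     possPts[k] = possPts[k] + 1
--             else:
--                 for k in range(len(possPts)):
--                     possPts[k] = possPts[k] + j
--         ret[tuple(possPts)] = h[i]
--     return ret
-- ===== SOURCE B (Python) =====
-- def handsToPoints(h):
--     ret = {}
--     for i in h:
--         base = 0
--         aces = 0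
--         for j in i:
--             if j == 1:
--                 aces += 1
--             else:
--                 base += j
--         ret[tuple(base + aces + 10 * bin(m).count('1') for m in range(2 ** aces))] = h[i]
--     return ret
-- ===== Notes on version B (the rewrite author's own statement) =====
-- stated objective: alternative
-- what changed: A grows possPts card by card with in-place index loops (doubling the list at each ace); B never builds the list iteratively: one counting pass yields base and the number of aces, then entry m of the 2**aces-long tuple is computed directly as base + aces + 10*popcount(m), a closed-form bitmask enumeration.
import Mathlib
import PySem

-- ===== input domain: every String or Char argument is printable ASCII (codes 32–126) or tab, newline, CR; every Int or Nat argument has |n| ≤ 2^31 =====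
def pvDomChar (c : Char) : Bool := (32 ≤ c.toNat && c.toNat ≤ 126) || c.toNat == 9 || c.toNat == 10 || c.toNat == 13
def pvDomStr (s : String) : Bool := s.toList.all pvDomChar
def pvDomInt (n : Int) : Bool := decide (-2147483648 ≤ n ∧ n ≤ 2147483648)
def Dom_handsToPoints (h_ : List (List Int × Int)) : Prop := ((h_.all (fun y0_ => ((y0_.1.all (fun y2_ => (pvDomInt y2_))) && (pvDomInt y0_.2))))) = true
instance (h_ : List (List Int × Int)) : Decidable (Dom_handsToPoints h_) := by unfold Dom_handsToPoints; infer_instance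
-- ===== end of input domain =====

-- B replaces A's incremental possPts construction (in-place index loops per card, list doubling at
-- each ace) by a closed-form bitmask enumeration: entry m is base + aces + 10*popcount(m).

-- ===== PORT A =====
-- inner 'for k in range(len(possPts))' loop of the ace branch (append possPts[k]+11, then possPts[k] += 1)
def pvAceLoop (ps : List Int) : List Int :=
  (PySem.List.pyRange 0 (PySem.List.len ps) 1).foldl
    (fun acc k =>
      let acc2 := acc ++ [PySem.List.pyGetD acc k 0 + 11]
      PySem.List.pySetD acc2 k (PySem.List.pyGetD acc2 k 0 + 1)) ps

-- inner 'for k in range(len(possPts))' loop of the non-ace branch (possPts[k] += j)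
def pvAddLoop (ps : List Int) (j : Int) : List Int :=
  (PySem.List.pyRange 0 (PySem.List.len ps) 1).foldl
    (fun acc k => PySem.List.pySetD acc k (PySem.List.pyGetD acc k 0 + j)) ps

-- the per-hand 'for j in i' loop building possPts
def pvPtsA (i : List Int) : List Int :=
  i.foldl (fun ps j => if j == 1 then pvAceLoop ps else pvAddLoop ps j) [0]

def handsToPoints (h_ : List (List Int × Int)) : List (List Int × Int) :=
  (h_.foldl (fun (ret : PySem.Dict (List Int) Int) p => ret.insert (pvPtsA p.1) p.2)
    PySem.Dict.empty).items

-- ===== PORT B =====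
-- bin(m).count('1') for m ≥ 0: the number of 1-digits in m's binary representation (exact on Nat)
def pvPop (m : Nat) : Nat :=
  if m = 0 then 0 else pvPop (m / 2) + m % 2
decreasing_by exact Nat.div_lt_self (Nat.pos_of_ne_zero (by assumption)) (by omega)

-- one counting pass: base = sum of non-ace cards, aces = number of 1s
def pvCountB (i : List Int) : Int × Nat :=
  i.foldl (fun s j => if j == 1 then (s.1, s.2 + 1) else (s.1 + j, s.2)) (0, 0)

-- tuple(base + aces + 10 * bin(m).count('1') for m in range(2 ** aces))
def pvPtsB (i : List Int) : List Int :=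
  let p := pvCountB i
  (List.range (2 ^ p.2)).map (fun m => p.1 + (p.2 : Int) + 10 * (pvPop m : Int))

def handsToPoints_alt (h_ : List (List Int × Int)) : List (List Int × Int) :=
  (h_.foldl (fun (ret : PySem.Dict (List Int) Int) p => ret.insert (pvPtsB p.1) p.2)
    PySem.Dict.empty).items

-- ===== PRECONDITION & SPEC =====
def Spec_handsToPoints (h_ : List (List Int × Int)) (out : List (List Int × Int)) : Prop := out = handsToPoints_alt h_
instance (h_ : List (List Int × Int)) (out : List (List Int × Int)) : Decidable (Spec_handsToPoints h_ out) := by unfold Spec_handsToPoints; infer_instance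

-- ===== CLAIM (what is proved, stated in full; the proofs are below) =====
def Claim_equal_handsToPoints : Prop := ∀ (h_ : List (List Int × Int)), Dom_handsToPoints h_ → Spec_handsToPoints h_ (handsToPoints h_)

-- ===== LEMMAS AND PROOFS =====

-- proof-side abbreviation: one ace step on a points list, in closed form
def pvDouble (ps : List Int) : List Int := ps.map (· + 1) ++ ps.map (· + 11)

-- closed form of the non-ace inner loop, by induction on the number of processed indices
theorem pvAddLoop_inv (ps : List Int) (j : Int) (n : Nat) (hn : n ≤ ps.length) :
    (PySem.List.pyRange 0 (n : Int) 1).foldl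
      (fun acc k => PySem.List.pySetD acc k (PySem.List.pyGetD acc k 0 + j)) ps
    = (ps.take n).map (· + j) ++ ps.drop n := by
  induction n with
  | zero => simp [PySem.List.pyRange_one_eq_nil (le_refl (0:Int))]
  | succ n ih =>
    have hlt : n < ps.length := hn
    have hlen : ((ps.take n).map (· + j)).length = n := by
      simp [List.length_take]; omega
    rw [show ((n + 1 : Nat) : Int) = (n : Int) + 1 by push_cast; ring,
        PySem.List.pyRange_one_succ_right (by positivity), List.foldl_append,
        ih (by omega)]
    simp only [List.foldl_cons, List.foldl_nil]
    rw [PySem.List.pyGetD_natCast, PySem.List.pySetD_natCast,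
        List.getD_append_right _ _ _ _ (by omega),
        List.drop_eq_getElem_cons hlt]
    simp only [hlen, Nat.sub_self, List.getD_cons_zero, List.set_append]
    rw [if_neg (by omega), List.set_cons_zero,
        List.take_add_one, List.getElem?_eq_getElem hlt]
    simp
    rw [List.take_add_one, List.getElem?_eq_getElem (by simpa using hlt : n < (List.map (fun x => x + j) ps).length)]
    simp

theorem pvAddLoop_closed (ps : List Int) (j : Int) : pvAddLoop ps j = ps.map (· + j) := by
  unfold pvAddLoop
  rw [PySem.List.len_eq, pvAddLoop_inv ps j ps.length (le_refl _)]
  simp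

-- closed form of the ace inner loop: +1 on each old slot, the +11 copies appended in order
theorem pvAceLoop_inv (ps : List Int) (n : Nat) (hn : n ≤ ps.length) :
    (PySem.List.pyRange 0 (n : Int) 1).foldl
      (fun acc k =>
        let acc2 := acc ++ [PySem.List.pyGetD acc k 0 + 11]
        PySem.List.pySetD acc2 k (PySem.List.pyGetD acc2 k 0 + 1)) ps
    = (ps.take n).map (· + 1) ++ ps.drop n ++ (ps.take n).map (· + 11) := by
  induction n with
  | zero => simp [PySem.List.pyRange_one_eq_nil (le_refl (0:Int))]
  | succ n ih =>
    have hlt : n < ps.length := hn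
    have hlen : ((ps.take n).map (· + 1)).length = n := by
      simp [List.length_take]; omega
    rw [show ((n + 1 : Nat) : Int) = (n : Int) + 1 by push_cast; ring,
        PySem.List.pyRange_one_succ_right (by positivity), List.foldl_append,
        ih (by omega)]
    simp only [List.foldl_cons, List.foldl_nil]
    rw [List.drop_eq_getElem_cons hlt]
    simp only [PySem.List.pyGetD_natCast, PySem.List.pySetD_natCast, List.append_assoc,
      List.cons_append]
    rw [List.getD_append_right _ _ _ _ (by omega), List.getD_append_right _ _ _ _ (by omega)]
    simp only [hlen, Nat.sub_self, List.getD_cons_zero, List.set_append]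
    rw [if_neg (by omega), List.set_cons_zero, List.take_add_one,
        List.getElem?_eq_getElem hlt]
    simp
    rw [List.take_add_one, List.getElem?_eq_getElem (by simpa using hlt : n < (List.map (fun x => x + 1) ps).length),
        List.take_add_one, List.getElem?_eq_getElem (by simpa using hlt : n < (List.map (fun x => x + 11) ps).length)]
    simp

theorem pvAceLoop_closed (ps : List Int) : pvAceLoop ps = pvDouble ps := by
  unfold pvAceLoop pvDouble
  rw [PySem.List.len_eq, pvAceLoop_inv ps ps.length (le_refl _)]
  simp

theorem pvDouble_map_add (ps : List Int) (b : Int) :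
    (ps.map (· + b)).map (· + 1) ++ (ps.map (· + b)).map (· + 11)
    = (pvDouble ps).map (· + b) := by
  unfold pvDouble
  simp only [List.map_append, List.map_map]
  congr 1 <;> exact List.map_congr_left (fun x _ => by simp [Function.comp]; ring)

-- A's per-card fold, with both inner loops in closed form, equals sum-then-iterated-doubling
theorem pvPure_fold (i : List Int) (ps : List Int) :
    i.foldl (fun ps j => if j == 1 then pvDouble ps else ps.map (· + j)) ps
    = pvDouble^[List.count 1 i] (ps.map (· + (i.filter (fun j => !(j == 1))).sum)) := by
  induction i generalizing ps with
  | nil => simp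
  | cons j i ih =>
    by_cases hj : j = 1
    · subst hj
      rw [List.foldl_cons, if_pos (by decide), ih, List.count_cons_self, List.filter_cons]
      simp only [show (!((1:Int) == 1)) = false from by decide, Bool.false_eq_true, if_false]
      rw [show (pvDouble ps).map (· + (i.filter (fun j => !(j == 1))).sum)
            = pvDouble (ps.map (· + (i.filter (fun j => !(j == 1))).sum)) from by
          rw [← pvDouble_map_add]; rfl,
        ← Function.iterate_succ_apply]
    · rw [List.foldl_cons, if_neg (by simpa using hj), ih, List.count_cons_of_ne (by omega),
        List.filter_cons]
      simp only [show (!((j:Int) == 1)) = true from by simpa using hj, if_true]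
      congr 1
      rw [List.map_map]
      exact List.map_congr_left (fun x _ => by simp [Function.comp, List.sum_cons]; ring)

-- pvPop satisfies its unguarded recurrence (also at 0)
theorem pvPop_zero : pvPop 0 = 0 := by rw [pvPop]; rfl

theorem pvPop_eq (m : Nat) : pvPop m = pvPop (m / 2) + m % 2 := by
  by_cases h : m = 0
  · subst h; simp [pvPop_zero]
  · rw [pvPop, if_neg h]

theorem pvPop_add_pow (k m : Nat) (hm : m < 2 ^ k) : pvPop (2 ^ k + m) = pvPop m + 1 := by
  induction k generalizing m with
  | zero =>
    interval_cases m
    norm_num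
    rw [pvPop_eq]
  | succ k ih =>
    have h2 : (2 ^ (k + 1) + m) / 2 = 2 ^ k + m / 2 := by
      rw [pow_succ]; omega
    have h3 : (2 ^ (k + 1) + m) % 2 = m % 2 := by
      rw [pow_succ]; omega
    rw [pvPop_eq (2 ^ (k + 1) + m), h2, h3,
        ih (m / 2) (by rw [pow_succ] at hm; omega), pvPop_eq m]
    ring

-- the iterated doubling from a singleton, in closed popcount form
theorem pvIter_closed (k : Nat) (b : Int) :
    pvDouble^[k] [b] = (List.range (2 ^ k)).map (fun m => b + (k : Int) + 10 * (pvPop m : Int)) := by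
  induction k with
  | zero => simp [List.range_one, pvPop_zero]
  | succ k ih =>
    rw [Function.iterate_succ_apply', ih]
    unfold pvDouble
    rw [show 2 ^ (k + 1) = 2 ^ k + 2 ^ k from by ring, List.range_add, List.map_append,
        List.map_map, List.map_map, List.map_map]
    congr 1
    · exact List.map_congr_left (fun m hm => by simp [Function.comp]; ring)
    · refine List.map_congr_left (fun m hm => ?_)
      have hm' : m < 2 ^ k := List.mem_range.mp hm
      simp [Function.comp, pvPop_add_pow k m hm']
      ring

-- B's counting pass computes the non-ace sum and the ace count
theorem pvCountB_inv (i : List Int) (b : Int) (a : Nat) :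
    i.foldl (fun s j => if j == 1 then (s.1, s.2 + 1) else (s.1 + j, s.2)) (b, a)
    = (b + (i.filter (fun j => !(j == 1))).sum, a + List.count 1 i) := by
  induction i generalizing b a with
  | nil => simp
  | cons j i ih =>
    by_cases hj : j = 1
    · subst hj
      rw [List.foldl_cons, if_pos (by decide), ih, List.count_cons_self, List.filter_cons]
      simp only [show (!((1:Int) == 1)) = false from by decide, Bool.false_eq_true, if_false]
      exact Prod.ext rfl (by omega)
    · rw [List.foldl_cons, if_neg (by simpa using hj), ih, List.count_cons_of_ne (by omega),
          List.filter_cons]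
      simp only [show (!((j:Int) == 1)) = true from by simpa using hj, if_true, List.sum_cons]
      exact Prod.ext (by ring) rfl

theorem pvPts_eq : pvPtsA = pvPtsB := by
  funext i
  unfold pvPtsA pvPtsB pvCountB
  rw [show (fun (ps : List Int) (j : Int) => if j == 1 then pvAceLoop ps else pvAddLoop ps j)
        = (fun (ps : List Int) (j : Int) => if j == 1 then pvDouble ps else ps.map (· + j)) by
      funext ps j
      by_cases hj : j == 1 <;> simp [hj, pvAceLoop_closed, pvAddLoop_closed]]
  rw [pvPure_fold, pvCountB_inv]
  simp only [List.map_cons, List.map_nil, Nat.zero_add, Int.zero_add]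
  rw [pvIter_closed]

-- ===== VERDICT (by name: the statement is the Claim_ definition above) =====
theorem handsToPoints_spec : Claim_equal_handsToPoints := by
  intro h_ _
  unfold Spec_handsToPoints handsToPoints handsToPoints_alt
  rw [pvPts_eq]
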